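-- pv_equiv track=rewrite | github.com/Beibaibaby/sampleoverjoin | wander_overlap.py | wander_p_set
-- ===== SOURCE A (Python) =====
-- def wander_p_set(nums):
--     ans_all = [[]]
--
--     for n in nums:
--         ans_all += [a+[n] for a in ans_all]
--
--     ans = []
--     for i in ans_all:
--         if len(i) > 1:
--             ans.append(i)
--
--     return ans
-- ===== SOURCE B (Python) =====
-- def wander_p_set(nums):
--     n = len(nums)
--     out = []
--     for mask in range(1 << n):
--         subset = [nums[j] for j in range(n) if (mask >> j) & 1]
--         if len(subset) > 1:
--             out.append(subset)
--     return out
-- ===== Notes on version B (the rewrite author's own statement) =====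
-- stated objective: alternative
-- what changed: B enumerates subsets by integer bitmask 0..2^n-1 (bit j selects nums[j]) with an inline length>1 filter, instead of growing and doubling a list of subsets and filtering in a second pass.
import Mathlib
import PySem

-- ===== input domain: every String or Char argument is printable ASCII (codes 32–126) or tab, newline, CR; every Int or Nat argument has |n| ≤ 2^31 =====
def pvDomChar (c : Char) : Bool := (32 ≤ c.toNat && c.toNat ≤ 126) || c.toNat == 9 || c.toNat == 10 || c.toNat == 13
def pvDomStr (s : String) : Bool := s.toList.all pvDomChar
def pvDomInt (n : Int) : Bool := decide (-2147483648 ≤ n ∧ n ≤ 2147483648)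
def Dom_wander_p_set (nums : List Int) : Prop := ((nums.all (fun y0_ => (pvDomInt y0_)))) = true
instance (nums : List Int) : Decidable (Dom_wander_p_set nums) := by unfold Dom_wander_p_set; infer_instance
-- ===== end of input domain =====

-- B enumerates subsets by integer bitmask (mask 0..2^n-1, bit j ↔ nums[j]) instead of
-- growing and doubling a list of subsets and filtering afterwards; objective: alternative.

-- ===== PORT A =====
def wander_p_set (nums : List Int) : List (List Int) :=
  let ans_all := nums.foldl (fun acc n => acc ++ acc.map (fun a => a ++ [n])) [[]]
  ans_all.foldl (fun ans i => if i.length > 1 then ans ++ [i] else ans) []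

-- ===== PORT B =====
-- subset = [nums[j] for j in range(len(nums)) if (mask >> j) & 1]
-- ((mask >> j) & 1 = 1) is exactly Nat.testBit mask j
def pvSubsetOf (nums : List Int) (mask : Nat) : List Int :=
  (nums.zipIdx).filterMap (fun p => if mask.testBit p.2 then some p.1 else none)

def wander_p_set_alt (nums : List Int) : List (List Int) :=
  (List.range (2 ^ nums.length)).foldl
    (fun out mask =>
      let subset := pvSubsetOf nums mask
      if subset.length > 1 then out ++ [subset] else out) []

-- ===== PRECONDITION & SPEC =====
def Spec_wander_p_set (nums : List Int) (out : List (List Int)) : Prop := out = wander_p_set_alt nums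
instance (nums : List Int) (out : List (List Int)) : Decidable (Spec_wander_p_set nums out) := by unfold Spec_wander_p_set; infer_instance

-- ===== CLAIM (what is proved, stated in full; the proofs are below) =====
def Claim_equal_wander_p_set : Prop := ∀ (nums : List Int), Dom_wander_p_set nums → Spec_wander_p_set nums (wander_p_set nums)

-- ===== LEMMAS AND PROOFS =====

theorem pv_subset_low (l : List Int) (x : Int) (m : Nat) (hm : m < 2 ^ l.length) :
    pvSubsetOf (l ++ [x]) m = pvSubsetOf l m := by
  simp only [pvSubsetOf, List.zipIdx_append, List.filterMap_append]
  have : m.testBit l.length = false := Nat.testBit_lt_two_pow hm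
  simp [List.zipIdx, this]

theorem pv_subset_high (l : List Int) (x : Int) (m : Nat) (hm : m < 2 ^ l.length) :
    pvSubsetOf (l ++ [x]) (2 ^ l.length + m) = pvSubsetOf l m ++ [x] := by
  simp only [pvSubsetOf, List.zipIdx_append, List.filterMap_append]
  have hk : (2 ^ l.length + m).testBit l.length = true := by
    simp [Nat.testBit_two_pow_add_eq, Nat.testBit_lt_two_pow hm]
  congr 1
  · apply List.filterMap_congr
    intro p hp
    have hlt : p.2 < l.length := by simpa using (List.mem_zipIdx hp).2.1
    rw [Nat.testBit_two_pow_add_gt hlt]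
  · simp [List.zipIdx, hk]

-- the doubling loop builds exactly the subsets of masks 0 .. 2^n - 1 in ascending order
theorem pv_doubling (nums : List Int) :
    nums.foldl (fun acc n => acc ++ acc.map (fun a => a ++ [n])) [[]]
      = (List.range (2 ^ nums.length)).map (pvSubsetOf nums) := by
  induction nums using List.reverseRecOn with
  | nil => simp [pvSubsetOf]
  | append_singleton l x ih =>
    rw [List.foldl_append, List.foldl_cons, List.foldl_nil, ih]
    have hlen : (l ++ [x]).length = l.length + 1 := by simp
    rw [hlen, pow_succ, Nat.mul_two, List.range_add, List.map_append, List.map_map]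
    congr 1
    · apply List.map_congr_left
      intro m hm
      exact (pv_subset_low l x m (List.mem_range.mp hm)).symm
    · rw [List.map_map]
      apply List.map_congr_left
      intro m hm
      exact (pv_subset_high l x m (List.mem_range.mp hm)).symm

-- ===== VERDICT (by name: the statement is the Claim_ definition above) =====
theorem wander_p_set_spec : Claim_equal_wander_p_set := by
  intro nums _
  show wander_p_set nums = wander_p_set_alt nums
  unfold wander_p_set wander_p_set_alt
  rw [pv_doubling]
  rw [show (fun (out : List (List Int)) (mask : Nat) =>
        let subset := pvSubsetOf nums mask
        if subset.length > 1 then out ++ [subset] else out)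
      = (fun out mask => if (pvSubsetOf nums mask).length > 1
          then out ++ [pvSubsetOf nums mask] else out) from rfl]
  rw [← List.foldl_map (f := pvSubsetOf nums)
      (g := fun (ans : List (List Int)) (i : List Int) => if i.length > 1 then ans ++ [i] else ans)]
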